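-- pv_equiv track=rewrite | github.com/Basanth2433/Math-functions | 2D array.py | find_significant_energy_increase_brute
-- ===== SOURCE A (Python) =====
-- def find_significant_energy_increase_brute(A):
--     """
--     Return a tuple (i,j)
--     where A[i:j] is the most
--     significant energy increase
-- period.
--     time complexity = O(n^2)
--     """
--     # TODO
--     max = 0
--     initial = 0
--     final = 0
--     for x in range(len(A)):
--         for y in range(x + 1, len(A)):
--             if max < A[y] - A[x]:
--                 max = A[y] - A[x]
--                 initial = x
--                 final = y
--     return (initial, final)
-- ===== SOURCE B (Python) =====
-- def find_significant_energy_increase_brute(A):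
--     """
--     Return a tuple (i,j)
--     where A[i:j] is the most
--     significant energy increase
--     period.
--     Single pass: track the earliest prefix minimum and the best increase so far.
--     time complexity = O(n)
--     """
--     best = 0
--     initial = 0
--     final = 0
--     if not A:
--         return (initial, final)
--     min_val = A[0]
--     min_idx = 0
--     for j in range(1, len(A)):
--         d = A[j] - min_val
--         if best < d:
--             best = d
--             initial = min_idx
--             final = j
--         if A[j] < min_val:
--             min_val = A[j]
--             min_idx = j
--     return (initial, final)
-- ===== Notes on version B (the rewrite author's own statement) =====
-- stated objective: faster
-- what changed: Replaced the O(n^2) scan over all index pairs by a single left-to-right pass that tracks the earliest prefix minimum (value and index) and updates the best increase once per element.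
import Mathlib
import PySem

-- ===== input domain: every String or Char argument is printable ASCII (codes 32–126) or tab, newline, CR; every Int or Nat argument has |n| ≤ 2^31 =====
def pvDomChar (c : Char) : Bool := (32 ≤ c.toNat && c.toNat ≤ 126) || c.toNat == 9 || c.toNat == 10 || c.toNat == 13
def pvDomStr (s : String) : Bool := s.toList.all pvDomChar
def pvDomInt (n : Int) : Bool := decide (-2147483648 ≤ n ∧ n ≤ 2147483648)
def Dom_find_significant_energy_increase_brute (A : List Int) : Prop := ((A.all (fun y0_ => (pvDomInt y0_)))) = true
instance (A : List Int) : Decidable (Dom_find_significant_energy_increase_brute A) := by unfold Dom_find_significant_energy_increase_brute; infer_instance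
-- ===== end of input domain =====

-- B replaces A's O(n^2) double loop by one pass tracking the earliest prefix minimum; proved to return the same pair.

-- ===== PORT A =====
-- literal transliteration of A's nested loops; state (max, initial, final)
def find_significant_energy_increase_brute (A : List Int) : List Int :=
  let s := (PySem.List.pyRange 0 (A.length : Int) 1).foldl (fun s x =>
      (PySem.List.pyRange (x + 1) (A.length : Int) 1).foldl (fun s y =>
        if s.1 < PySem.List.pyGetD A y 0 - PySem.List.pyGetD A x 0 then
          (PySem.List.pyGetD A y 0 - PySem.List.pyGetD A x 0, x, y)
        else s) s) ((0, 0, 0) : Int × Int × Int)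
  [s.2.1, s.2.2]

-- ===== PORT B =====
-- literal transliteration of Source B; state ((best, initial, final), min_val, min_idx)
def find_significant_energy_increase_brute_alt (A : List Int) : List Int :=
  match A with
  | [] => [0, 0]
  | a :: _ =>
    let st := (PySem.List.pyRange 1 (A.length : Int) 1).foldl
      (fun (st : (Int × Int × Int) × Int × Int) j =>
        let d := PySem.List.pyGetD A j 0 - st.2.1
        let b := if st.1.1 < d then (d, st.2.2, j) else st.1
        let mn := if PySem.List.pyGetD A j 0 < st.2.1 then (PySem.List.pyGetD A j 0, j) else st.2
        (b, mn)) (((0, 0, 0) : Int × Int × Int), a, (0 : Int))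
    [st.1.2.1, st.1.2.2]

-- ===== PRECONDITION & SPEC =====
def Spec_find_significant_energy_increase_brute (A : List Int) (out : List Int) : Prop := out = find_significant_energy_increase_brute_alt A
instance (A : List Int) (out : List Int) : Decidable (Spec_find_significant_energy_increase_brute A out) := by unfold Spec_find_significant_energy_increase_brute; infer_instance

-- ===== CLAIM (what is proved, stated in full; the proofs are below) =====
def Claim_equal_find_significant_energy_increase_brute : Prop := ∀ (A : List Int), Dom_find_significant_energy_increase_brute A → Spec_find_significant_energy_increase_brute A (find_significant_energy_increase_brute A)

-- ===== LEMMAS AND PROOFS =====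

-- value at index k (indices used by both loops are always in range)
def gA (A : List Int) (k : Nat) : Int := A.getD k 0

-- "the state s is a correct summary of the pairs (x, y), x < y < |A|, admitted by S,
--  with ties resolved by the order lex"
def BestOn (A : List Int) (S : Nat → Nat → Prop) (lex : Nat × Nat → Nat × Nat → Prop)
    (s : Int × Int × Int) : Prop :=
  (∀ x y, x < y → y < A.length → S x y → gA A y - gA A x ≤ s.1) ∧
  ((s.1 = 0 ∧ s.2.1 = 0 ∧ s.2.2 = 0) ∨
   (0 < s.1 ∧ ∃ i j : Nat, s.2.1 = (i : Int) ∧ s.2.2 = (j : Int) ∧ i < j ∧ j < A.length ∧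
      S i j ∧ gA A j - gA A i = s.1 ∧
      ∀ x y, x < y → y < A.length → S x y → gA A y - gA A x = s.1 → lex (i, j) (x, y)))

def lexX (p q : Nat × Nat) : Prop := p.1 < q.1 ∨ (p.1 = q.1 ∧ p.2 ≤ q.2)
def lexY (p q : Nat × Nat) : Prop := p.2 < q.2 ∨ (p.2 = q.2 ∧ p.1 ≤ q.1)

lemma bestOn_congr {A : List Int} {S S' : Nat → Nat → Prop} {lex} {s}
    (h : ∀ x y, x < y → y < A.length → (S x y ↔ S' x y)) :
    BestOn A S lex s → BestOn A S' lex s := by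
  rintro ⟨hb, hc⟩
  refine ⟨fun x y hxy hy hS => hb x y hxy hy ((h x y hxy hy).2 hS), ?_⟩
  rcases hc with h0 | ⟨hp, i, j, e1, e2, hij, hj, hS, hd, hmin⟩
  · exact Or.inl h0
  · exact Or.inr ⟨hp, i, j, e1, e2, hij, hj, (h i j hij hj).1 hS, hd,
      fun x y hxy hy hS' hd' => hmin x y hxy hy ((h x y hxy hy).2 hS') hd'⟩

-- uniqueness: a full summary in lexX order and one in lexY order coincide
lemma bestOn_unique {A : List Int} {s s' : Int × Int × Int}
    (hX : BestOn A (fun _ _ => True) lexX s) (hY : BestOn A (fun _ _ => True) lexY s') :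
    s = s' := by
  obtain ⟨hbX, hcX⟩ := hX
  obtain ⟨hbY, hcY⟩ := hY
  rcases hcX with ⟨m0, i0, j0⟩ | ⟨hpX, i, j, e1, e2, hij, hj, -, hd, hminX⟩
  · rcases hcY with ⟨m0', i0', j0'⟩ | ⟨hpY, i', j', e1', e2', hij', hj', -, hd', hminY⟩
    · ext <;> simp_all
    · exfalso
      have := hbX i' j' hij' hj' trivial
      omega
  · rcases hcY with ⟨m0', i0', j0'⟩ | ⟨hpY, i', j', e1', e2', hij', hj', -, hd', hminY⟩
    · exfalso
      have := hbY i j hij hj trivial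
      omega
    · -- equal maxima
      have hm : s.1 = s'.1 := by
        have h1 := hbX i' j' hij' hj' trivial
        have h2 := hbY i j hij hj trivial
        omega
      have hdX' : gA A j' - gA A i' = s.1 := by omega
      have hdY' : gA A j - gA A i = s'.1 := by omega
      have hL1 := hminX i' j' hij' hj' trivial hdX'
      have hL2 := hminY i j hij hj trivial hdY'
      -- exchange argument: i < i' together with j' < j is impossible
      have hexch : ¬ (i < i' ∧ j' < j) := by
        rintro ⟨hii, hjj⟩
        -- pair (i, j') is admissible
        have hij'' : i < j' := lt_trans hii hij'
        have hb1 := hbX i j' hij'' hj' trivial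
        -- g i' ≤ g i
        have hgi : gA A i' ≤ gA A i := by omega
        -- pair (i', j) is admissible too
        have hij2 : i' < j := lt_trans hij' hjj
        have hb2 := hbX i' j hij2 hj trivial
        -- then (i, j') attains the maximum
        have hd2 : gA A j' - gA A i = s.1 := by omega
        have h5 := hminX i j' hij'' hj' trivial hd2
        rcases h5 with h5 | ⟨-, h5⟩
        · simp at h5
        · simp at h5
          omega
      unfold lexX at hL1; unfold lexY at hL2
      simp at hL1 hL2
      have : i = i' ∧ j = j' := by omega
      ext <;> simp_all

-- generic foldl invariant over List.range'
lemma foldl_range'_inv {α : Type} (f : α → Nat → α) (P : Nat → α → Prop) :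
    ∀ (len a : Nat) (s0 : α), P a s0 →
      (∀ k s, a ≤ k → k < a + len → P k s → P (k + 1) (f s k)) →
      P (a + len) (List.foldl f s0 (List.range' a len)) := by
  intro len
  induction len with
  | zero => intro a s0 h0 _; simpa using h0
  | succ m ih =>
    intro a s0 h0 hstep
    have h1 : P (a + 1) (f s0 a) := hstep a s0 le_rfl (by omega) h0
    have := ih (a + 1) (f s0 a) h1 (fun k s hk1 hk2 hP => hstep k s (by omega) (by omega) hP)
    rw [List.range'_succ]
    simpa [Nat.add_comm, Nat.add_assoc, Nat.add_left_comm] using this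

-- the one step of A's inner loop, at nat indices
def stepA (A : List Int) (s : Int × Int × Int) (x y : Nat) : Int × Int × Int :=
  if s.1 < gA A y - gA A x then (gA A y - gA A x, (x : Int), (y : Int)) else s

-- A's inner-loop step preserves the X-summary
lemma stepA_inv {A : List Int} {k m : Nat} {s : Int × Int × Int}
    (hkm : k < m) (hm : m < A.length)
    (h : BestOn A (fun x y => x < k ∨ (x = k ∧ y < m)) lexX s) :
    BestOn A (fun x y => x < k ∨ (x = k ∧ y < m + 1)) lexX (stepA A s k m) := by
  obtain ⟨hb, hc⟩ := h
  have hnew : ∀ x y, x < y → y < A.length → (x < k ∨ (x = k ∧ y < m + 1)) →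
      (x < k ∨ (x = k ∧ y < m)) ∨ (x = k ∧ y = m) := by omega
  unfold stepA
  split_ifs with hlt
  · -- update to the new pair (k, m)
    have hpos : 0 < gA A m - gA A k := by
      rcases hc with ⟨h0, -, -⟩ | ⟨hp, -⟩ <;> omega
    refine ⟨?_, Or.inr ⟨hpos, k, m, rfl, rfl, hkm, hm, Or.inr ⟨rfl, by omega⟩, rfl, ?_⟩⟩
    · intro x y hxy hy hS
      rcases hnew x y hxy hy hS with hold | ⟨rfl, rfl⟩
      · have := hb x y hxy hy hold; omega
      · simp
    · intro x y hxy hy hS hd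
      rcases hnew x y hxy hy hS with hold | ⟨rfl, rfl⟩
      · have := hb x y hxy hy hold; omega
      · exact Or.inr ⟨rfl, le_rfl⟩
  · -- keep the old state
    refine ⟨?_, ?_⟩
    · intro x y hxy hy hS
      rcases hnew x y hxy hy hS with hold | ⟨rfl, rfl⟩
      · exact hb x y hxy hy hold
      · omega
    · rcases hc with ⟨h0, e1, e2⟩ | ⟨hp, i, j, e1, e2, hij, hj, hS, hd, hmin⟩
      · exact Or.inl ⟨h0, e1, e2⟩
      · refine Or.inr ⟨hp, i, j, e1, e2, hij, hj, ?_, hd, ?_⟩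
        · omega
        · intro x y hxy hy hS' hd'
          rcases hnew x y hxy hy hS' with hold | ⟨rfl, rfl⟩
          · exact hmin x y hxy hy hold hd'
          · rcases hS with hik | ⟨hik, hjm⟩
            · exact Or.inl hik
            · exact Or.inr ⟨hik, by omega⟩

-- A's fold at nat level
def foldA (A : List Int) : Int × Int × Int :=
  (List.range' 0 A.length).foldl
    (fun s x => (List.range' (x + 1) (A.length - (x + 1))).foldl (fun s y => stepA A s x y) s)
    (0, 0, 0)

lemma foldA_best (A : List Int) : BestOn A (fun _ _ => True) lexX (foldA A) := by
  have main := foldl_range'_inv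
      (fun s x => (List.range' (x + 1) (A.length - (x + 1))).foldl (fun s y => stepA A s x y) s)
      (fun k s => BestOn A (fun x y => x < k) lexX s)
      A.length 0 (0, 0, 0)
      (⟨by intro x y _ _ h; omega, Or.inl ⟨rfl, rfl, rfl⟩⟩)
      ?_
  · have := bestOn_congr (A := A) (S := fun x y => x < A.length)
      (S' := fun _ _ => True) (lex := lexX) (s := foldA A) (by intro x y hxy hy; exact iff_of_true (by omega) trivial)
    exact this (by simpa [foldA] using main)
  · intro k s hk0 hk hP
    have inner := foldl_range'_inv (fun s y => stepA A s k y)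
        (fun m s => BestOn A (fun x y => x < k ∨ (x = k ∧ y < m)) lexX s)
        (A.length - (k + 1)) (k + 1) s
        (bestOn_congr (by intro x y hxy hy; omega) hP)
        (fun m s hm1 hm2 hPs => stepA_inv (by omega) (by omega) hPs)
    have hlen : k + 1 + (A.length - (k + 1)) = A.length := by omega
    rw [hlen] at inner
    exact bestOn_congr (by intro x y hxy hy; omega) inner

-- B's state: summary over pairs with y < t, plus the earliest minimum of the prefix of length t
def InvB (A : List Int) (t : Nat) (st : (Int × Int × Int) × Int × Int) : Prop :=
  BestOn A (fun _ y => y < t) lexY st.1 ∧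
  ∃ mi : Nat, st.2.2 = (mi : Int) ∧ mi < t ∧ st.2.1 = gA A mi ∧
    (∀ k, k < t → st.2.1 ≤ gA A k) ∧ (∀ k, k < mi → st.2.1 < gA A k)

def stepB (A : List Int) (st : (Int × Int × Int) × Int × Int) (j : Nat) :
    (Int × Int × Int) × Int × Int :=
  let d := gA A j - st.2.1
  let b := if st.1.1 < d then (d, st.2.2, (j : Int)) else st.1
  let mn := if gA A j < st.2.1 then (gA A j, (j : Int)) else st.2
  (b, mn)

lemma stepB_inv {A : List Int} {t : Nat} {st} (ht : t < A.length)
    (h : InvB A t st) : InvB A (t + 1) (stepB A st t) := by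
  obtain ⟨⟨hbnd, hcase⟩, mi, emi, hmit, emv, hminp, hstrict⟩ := h
  have hnn : 0 ≤ st.1.1 := by rcases hcase with ⟨h0, -⟩ | ⟨hp, -⟩ <;> omega
  refine ⟨?_, ?_⟩
  · -- the best-so-far summary
    show BestOn A (fun _ y => y < t + 1) lexY
      (if st.1.1 < gA A t - st.2.1 then (gA A t - st.2.1, st.2.2, (t : Int)) else st.1)
    split_ifs with hc
    · refine ⟨?_, Or.inr ⟨by omega, mi, t, emi, rfl, hmit, ht, by omega, by rw [emv], ?_⟩⟩
      · intro x y hxy hylen hS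
        rcases Nat.lt_or_ge y t with hyt | hyt
        · have := hbnd x y hxy hylen hyt; omega
        · have hyt' : y = t := by omega
          subst hyt'
          have := hminp x (by omega)
          omega
      · intro x y hxy hylen hS hd
        rcases Nat.lt_or_ge y t with hyt | hyt
        · have := hbnd x y hxy hylen hyt; omega
        · have hyt' : y = t := by omega
          subst hyt'
          refine Or.inr ⟨rfl, ?_⟩
          rcases Nat.lt_or_ge x mi with hxm | hxm
          · have := hstrict x hxm
            omega
          · exact hxm
    · refine ⟨?_, ?_⟩
      · intro x y hxy hylen hS
        rcases Nat.lt_or_ge y t with hyt | hyt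
        · exact hbnd x y hxy hylen hyt
        · have hyt' : y = t := by omega
          subst hyt'
          have := hminp x (by omega)
          omega
      · rcases hcase with h0 | ⟨hp, i, j, e1, e2, hij, hjlen, hS, hd, hmin⟩
        · exact Or.inl h0
        · refine Or.inr ⟨hp, i, j, e1, e2, hij, hjlen, by omega, hd, ?_⟩
          intro x y hxy hylen hS' hd'
          rcases Nat.lt_or_ge y t with hyt | hyt
          · exact hmin x y hxy hylen hyt hd'
          · exact Or.inl (by omega)
  · -- the earliest prefix minimum
    show ∃ mi' : Nat,
      (if gA A t < st.2.1 then (gA A t, (t : Int)) else st.2).2 = (mi' : Int) ∧ mi' < t + 1 ∧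
      (if gA A t < st.2.1 then (gA A t, (t : Int)) else st.2).1 = gA A mi' ∧
      (∀ k, k < t + 1 → (if gA A t < st.2.1 then (gA A t, (t : Int)) else st.2).1 ≤ gA A k) ∧
      (∀ k, k < mi' → (if gA A t < st.2.1 then (gA A t, (t : Int)) else st.2).1 < gA A k)
    split_ifs with hc2
    · refine ⟨t, rfl, by omega, rfl, ?_, ?_⟩
      · intro k hk
        rcases Nat.lt_or_ge k t with hkt | hkt
        · have := hminp k hkt; omega
        · have : k = t := by omega
          subst this; omega
      · intro k hk
        have := hminp k hk
        omega
    · refine ⟨mi, emi, by omega, emv, ?_, hstrict⟩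
      intro k hk
      rcases Nat.lt_or_ge k t with hkt | hkt
      · exact hminp k hkt
      · have : k = t := by omega
        subst this; omega

def foldB (A : List Int) (a : Int) : (Int × Int × Int) × Int × Int :=
  (List.range' 1 (A.length - 1)).foldl (stepB A) ((0, 0, 0), a, 0)

lemma foldB_best (A : List Int) (a : Int) (rest : List Int) (hA : A = a :: rest) :
    BestOn A (fun _ _ => True) lexY (foldB A a).1 := by
  have hlen : 1 ≤ A.length := by subst hA; simp
  have base : InvB A 1 ((0, 0, 0), a, 0) := by
    refine ⟨⟨by intro x y hxy hylen hS; omega, Or.inl ⟨rfl, rfl, rfl⟩⟩,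
      0, by simp, by omega, by subst hA; rfl, ?_, by intro k hk; omega⟩
    intro k hk
    have : k = 0 := by omega
    subst this; subst hA; simp [gA]
  have main := foldl_range'_inv (stepB A) (fun t st => InvB A t st) (A.length - 1) 1
      ((0, 0, 0), a, 0) base (fun k s hk1 hk2 hP => stepB_inv (by omega) hP)
  have hn : 1 + (A.length - 1) = A.length := by omega
  rw [hn] at main
  exact bestOn_congr (by intro x y hxy hy; exact iff_of_true hy trivial) main.1

-- the ports compute the nat-level folds
lemma pyRange_natCast' (a b : Nat) :
    PySem.List.pyRange (a : Int) (b : Int) 1 = (List.range' a (b - a)).map (Nat.cast) := by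
  rw [PySem.List.pyRange_one, List.range'_eq_map_range, List.map_map]
  have h1 : ((b : Int) - (a : Int)).toNat = b - a := by omega
  rw [h1]
  apply List.map_congr_left
  intro k hk
  simp

lemma portA_inner (A : List Int) (x : Nat) (s : Int × Int × Int) :
    (PySem.List.pyRange ((x : Int) + 1) (A.length : Int) 1).foldl
      (fun s y => if s.1 < PySem.List.pyGetD A y 0 - PySem.List.pyGetD A (x : Int) 0 then
          (PySem.List.pyGetD A y 0 - PySem.List.pyGetD A (x : Int) 0, (x : Int), y) else s) s
    = (List.range' (x + 1) (A.length - (x + 1))).foldl (fun s y => stepA A s x y) s := by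
  have hx : (x : Int) + 1 = ((x + 1 : Nat) : Int) := by push_cast; ring
  rw [hx, pyRange_natCast' (x + 1) A.length, List.foldl_map]
  congr 1
  funext s y
  simp [stepA, gA]

lemma portA_eq (A : List Int) :
    find_significant_energy_increase_brute A = [(foldA A).2.1, (foldA A).2.2] := by
  unfold find_significant_energy_increase_brute foldA
  rw [show PySem.List.pyRange 0 (A.length : Int) 1 = (List.range' 0 A.length).map Nat.cast from
    by simpa using pyRange_natCast' 0 A.length, List.foldl_map]
  simp only [portA_inner]

lemma portB_step (A : List Int) (st : (Int × Int × Int) × Int × Int) (j : Nat) :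
    ((if st.1.1 < PySem.List.pyGetD A (j : Int) 0 - st.2.1 then
        (PySem.List.pyGetD A (j : Int) 0 - st.2.1, st.2.2, (j : Int)) else st.1),
     (if PySem.List.pyGetD A (j : Int) 0 < st.2.1 then
        (PySem.List.pyGetD A (j : Int) 0, (j : Int)) else st.2)) = stepB A st j := by
  simp [stepB, gA]

lemma portB_eq (A : List Int) (a : Int) (rest : List Int) (hA : A = a :: rest) :
    find_significant_energy_increase_brute_alt A =
      [(foldB A a).1.2.1, (foldB A a).1.2.2] := by
  subst hA
  unfold find_significant_energy_increase_brute_alt foldB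
  dsimp only
  rw [show PySem.List.pyRange 1 (((a :: rest).length : Nat) : Int) 1 =
      (List.range' 1 ((a :: rest).length - 1)).map Nat.cast from
    by simpa using pyRange_natCast' 1 (a :: rest).length, List.foldl_map]
  simp only [portB_step]

-- ===== VERDICT (by name: the statement is the Claim_ definition above) =====
theorem find_significant_energy_increase_brute_spec : Claim_equal_find_significant_energy_increase_brute := by
  intro A _
  unfold Spec_find_significant_energy_increase_brute
  cases A with
  | nil => decide
  | cons a rest =>
    rw [portA_eq, portB_eq (a :: rest) a rest rfl]
    have hu := bestOn_unique (foldA_best (a :: rest)) (foldB_best (a :: rest) a rest rfl)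
    rw [hu]
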